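-- pv_equiv track=rewrite | github.com/Devansh-Patel-2929/Movie-Recommender-using-vector-search | ui.py | search_movie_titles
-- ===== SOURCE A (Python) =====
-- from typing import List, Dict, Any, Tuple
--
-- def search_movie_titles(query: str, movie_titles: List[str], max_results: int = 5) -> List[str]:
--     """Search for movie titles that match the query"""
--     if not query:
--         return []
--
--     query = query.lower().strip()
--     matches = []
--
--     for title in movie_titles:
--         if query in title.lower():
--             matches.append(title)
--
--     # Sort by how early the query appears in the title
--     matches.sort(key=lambda x: x.lower().find(query))
--
--     return matches[:max_results]
-- ===== SOURCE B (Python) =====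
-- def search_movie_titles(query, movie_titles, max_results=5):
--     """Search for movie titles that match the query (bucket sort on match position)."""
--     if not query:
--         return []
--     q = query.lower().strip()
--     buckets = {}
--     for title in movie_titles:
--         pos = title.lower().find(q)
--         if pos != -1:
--             buckets.setdefault(pos, []).append(title)
--     result = []
--     for pos in sorted(buckets):
--         result.extend(buckets[pos])
--     return result[:max_results]
-- ===== Notes on version B (the rewrite author's own statement) =====
-- stated objective: alternative
-- what changed: Replaces filter-then-comparison-sort with a single pass that buckets matching titles by first match position in a dict, then concatenates buckets in ascending position order (a counting/bucket sort, stable by insertion order).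
import Mathlib
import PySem

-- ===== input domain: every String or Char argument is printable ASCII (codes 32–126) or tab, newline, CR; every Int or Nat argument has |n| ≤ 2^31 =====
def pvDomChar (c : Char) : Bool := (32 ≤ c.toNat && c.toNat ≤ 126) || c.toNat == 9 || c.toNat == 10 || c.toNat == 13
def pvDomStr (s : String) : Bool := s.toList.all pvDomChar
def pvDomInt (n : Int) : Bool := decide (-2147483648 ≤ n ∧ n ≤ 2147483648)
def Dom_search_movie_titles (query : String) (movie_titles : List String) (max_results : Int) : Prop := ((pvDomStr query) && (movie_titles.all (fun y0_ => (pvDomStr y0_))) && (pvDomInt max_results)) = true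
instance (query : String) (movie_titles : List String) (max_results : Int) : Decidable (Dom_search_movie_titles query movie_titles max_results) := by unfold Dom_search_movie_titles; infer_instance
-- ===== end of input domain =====

-- B replaces A's filter-then-comparison-sort with a one-pass bucketing of matching titles
-- by first match position, concatenated in ascending position order (alternative algorithm).

-- ===== PORT A =====
def search_movie_titles (query : String) (movie_titles : List String) (max_results : Int) : List String :=
  if query == "" then []
  else
    let q := PySem.Str.strip (PySem.Str.lower query)
    let ms := movie_titles.foldl
      (fun acc title => if PySem.Str.isIn q (PySem.Str.lower title) then acc ++ [title] else acc) []
    let sortedMatches := PySem.List.sorted ms (fun x => PySem.Str.find (PySem.Str.lower x) q) false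
    PySem.List.slice sortedMatches none (some max_results)

-- ===== PORT B =====
def search_movie_titles_alt (query : String) (movie_titles : List String) (max_results : Int) : List String :=
  if query == "" then []
  else
    let q := PySem.Str.strip (PySem.Str.lower query)
    let buckets : PySem.Dict Int (List String) := movie_titles.foldl
      (fun d title =>
        let pos := PySem.Str.find (PySem.Str.lower title) q
        if pos ≠ -1 then d.modify pos [] (· ++ [title]) else d)
      PySem.Dict.empty
    let result := (PySem.List.sorted buckets.keys (fun k => k) false).foldl
      (fun acc pos => acc ++ buckets.getD pos []) []
    PySem.List.slice result none (some max_results)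

-- ===== PRECONDITION & SPEC =====
def Spec_search_movie_titles (query : String) (movie_titles : List String) (max_results : Int) (out : List String) : Prop := out = search_movie_titles_alt query movie_titles max_results
instance (query : String) (movie_titles : List String) (max_results : Int) (out : List String) : Decidable (Spec_search_movie_titles query movie_titles max_results out) := by unfold Spec_search_movie_titles; infer_instance

-- ===== CLAIM (what is proved, stated in full; the proofs are below) =====
def Claim_equal_search_movie_titles : Prop := ∀ (query : String) (movie_titles : List String) (max_results : Int), Dom_search_movie_titles query movie_titles max_results → Spec_search_movie_titles query movie_titles max_results (search_movie_titles query movie_titles max_results)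

-- ===== LEMMAS AND PROOFS =====

-- insertBy skips a prefix whose elements x must not go before
theorem pv_insertBy_append {α : Type} (before : α → α → Bool) (x : α) (p s : List α)
    (hp : ∀ y ∈ p, before x y = false) :
    PySem.List.insertBy before x (p ++ s) = p ++ PySem.List.insertBy before x s := by
  induction p with
  | nil => simp
  | cons y p ih =>
    simp only [List.cons_append, PySem.List.insertBy]
    rw [hp y (by simp)]
    simp only [if_neg (by simp : ¬ (false = true))]
    rw [ih (fun z hz => hp z (by simp [hz]))]

-- insertBy puts x in front of a head it must go before
theorem pv_insertBy_cons_of_before {α : Type} (before : α → α → Bool) (x y : α) (t : List α)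
    (h : before x y = true) : PySem.List.insertBy before x (y :: t) = x :: y :: t := by
  simp [PySem.List.insertBy, h]

-- inserting x into the grouped (bucketed) list, with x's own bucket present,
-- appends x at the end of its bucket
theorem pv_insertBy_grouped {α : Type} (key : α → Int) (x : α) (ks1 ks2 : List Int) (xs : List α)
    (h1 : ∀ k ∈ ks1, k < key x) (h2 : ∀ k ∈ ks2, key x < k) :
    PySem.List.insertBy (fun a b => decide (key a < key b)) x
      ((ks1 ++ key x :: ks2).flatMap (fun k => xs.filter (fun y => key y == k)))
    = (ks1 ++ key x :: ks2).flatMap (fun k => (xs ++ [x]).filter (fun y => key y == k)) := by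
  have hf1 : ∀ k ∈ ks1, (xs ++ [x]).filter (fun y => key y == k) = xs.filter (fun y => key y == k) := by
    intro k hk
    have : ¬ (key x == k) = true := by simp; exact (ne_of_gt (h1 k hk))
    simp [List.filter_append, this]
  have hf2 : ∀ k ∈ ks2, (xs ++ [x]).filter (fun y => key y == k) = xs.filter (fun y => key y == k) := by
    intro k hk
    have : ¬ (key x == k) = true := by simp; exact (ne_of_lt (h2 k hk))
    simp [List.filter_append, this]
  have hfx : (xs ++ [x]).filter (fun y => key y == key x) = xs.filter (fun y => key y == key x) ++ [x] := by
    simp [List.filter_append]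
  rw [List.flatMap_append, List.flatMap_cons, List.flatMap_append, List.flatMap_cons]
  rw [List.flatMap_congr hf1, List.flatMap_congr hf2, hfx]
  -- LHS: skip the prefix (buckets < key x, plus x's own bucket)
  rw [show ks1.flatMap (fun k => xs.filter (fun y => key y == k)) ++
        (xs.filter (fun y => key y == key x) ++ ks2.flatMap (fun k => xs.filter (fun y => key y == k))) =
        (ks1.flatMap (fun k => xs.filter (fun y => key y == k)) ++ xs.filter (fun y => key y == key x)) ++
        ks2.flatMap (fun k => xs.filter (fun y => key y == k)) from by simp]
  rw [pv_insertBy_append _ x _ _ ?hp]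
  case hp =>
    intro y hy
    simp only [List.mem_append, List.mem_flatMap, List.mem_filter] at hy
    rcases hy with ⟨k, hk, _, hky⟩ | ⟨_, hky⟩
    · have : key y = k := by exact_mod_cast beq_iff_eq.mp hky
      simp [this]; exact le_of_lt (h1 k hk)
    · have : key y = key x := by exact_mod_cast beq_iff_eq.mp hky
      simp [this]
  -- now insert into the suffix (all buckets > key x): x goes at its head
  cases hA2 : ks2.flatMap (fun k => xs.filter (fun y => key y == k)) with
  | nil => simp [PySem.List.insertBy]
  | cons y t =>
    have hky : key x < key y := by
      have : y ∈ ks2.flatMap (fun k => xs.filter (fun y => key y == k)) := by rw [hA2]; simp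
      simp only [List.mem_flatMap, List.mem_filter] at this
      obtain ⟨k, hk, _, hky⟩ := this
      have : key y = k := by exact_mod_cast beq_iff_eq.mp hky
      rw [this]; exact h2 k hk
    rw [pv_insertBy_cons_of_before _ _ _ _ (by simpa using hky)]
    simp

-- stable sort = concatenation of buckets over strictly increasing keys covering xs
theorem pv_sorted_eq_grouped {α : Type} (key : α → Int) (ks : List Int)
    (hks : ks.Pairwise (· < ·)) (xs : List α) (hall : ∀ y ∈ xs, key y ∈ ks) :
    ks.flatMap (fun k => xs.filter (fun y => key y == k)) = PySem.List.sorted xs key false := by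
  induction xs using List.reverseRecOn with
  | nil => simp [PySem.List.sorted]
  | append_singleton xs x ih =>
    have hx : key x ∈ ks := hall x (by simp)
    obtain ⟨ks1, ks2, hsplit⟩ := List.append_of_mem hx
    subst hsplit
    have hpa := (List.pairwise_append.mp hks)
    have h1 : ∀ k ∈ ks1, k < key x := fun k hk => hpa.2.2 k hk (key x) (by simp)
    have h2 : ∀ k ∈ ks2, key x < k := fun k hk => (List.pairwise_cons.mp hpa.2.1).1 k hk
    rw [PySem.List.sorted_eq_foldl_insertBy, List.foldl_append, List.foldl_cons, List.foldl_nil,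
        ← PySem.List.sorted_eq_foldl_insertBy]
    rw [← ih (fun y hy => hall y (by simp [hy]))]
    exact (pv_insertBy_grouped key x ks1 ks2 xs h1 h2).symm

theorem search_movie_titles_eq (query : String) (movie_titles : List String) (max_results : Int) :
    search_movie_titles query movie_titles max_results
      = search_movie_titles_alt query movie_titles max_results := by
  unfold search_movie_titles search_movie_titles_alt
  by_cases hq : query = ""
  · simp [hq]
  · rw [if_neg (by simpa using hq), if_neg (by simpa using hq)]
    dsimp only
    congr 1
    set q := PySem.Str.strip (PySem.Str.lower query) with hqdef
    set key : String → Int := fun x => PySem.Str.find (PySem.Str.lower x) q with hkey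
    set p : String → Bool := fun title => PySem.Str.isIn q (PySem.Str.lower title) with hp
    -- A's matches list
    have hmatches : movie_titles.foldl
        (fun acc title => if PySem.Str.isIn q (PySem.Str.lower title) then acc ++ [title] else acc) []
        = movie_titles.filter p := by
      rw [show (fun (acc : List String) title =>
            if PySem.Str.isIn q (PySem.Str.lower title) then acc ++ [title] else acc)
          = (fun (acc : List String) title => if p title then acc ++ [title] else acc) from by
            funext acc title; rw [hp]]
      rw [PySem.List.foldl_append_if_eq_filter p movie_titles []]
      simp
    set ms := movie_titles.filter p with hm
    -- predicate equality: find ≠ -1 ↔ isIn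
    have hpred : ∀ t, (decide (key t ≠ -1)) = p t := by
      intro t
      have hiff : (key t ≠ -1) ↔ (p t = true) := by
        rw [hp, hkey]
        simp only [PySem.Str.isIn_iff_infix]
        constructor
        · intro h
          by_contra hc
          exact h ((PySem.Str.find_eq_neg_one_iff _ _).mpr hc)
        · intro h hcontra
          exact (PySem.Str.find_eq_neg_one_iff _ _).mp hcontra h
      rw [show p t = decide (p t = true) from by simp]
      exact decide_eq_decide.mpr hiff
    -- B's buckets as a fold over ms
    have hbuck : movie_titles.foldl
        (fun d title =>
          if PySem.Str.find (PySem.Str.lower title) q ≠ -1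
          then d.modify (PySem.Str.find (PySem.Str.lower title) q) [] (· ++ [title]) else d)
        (PySem.Dict.empty : PySem.Dict Int (List String))
        = ms.foldl (fun d title => d.modify (key title) [] (· ++ [title])) PySem.Dict.empty := by
      rw [show (fun (d : PySem.Dict Int (List String)) title =>
            if PySem.Str.find (PySem.Str.lower title) q ≠ -1
            then d.modify (PySem.Str.find (PySem.Str.lower title) q) [] (· ++ [title]) else d)
          = (fun (d : PySem.Dict Int (List String)) title =>
            if (decide (key title ≠ -1)) = true
            then d.modify (key title) [] (· ++ [title]) else d) from by
            funext d title; rw [hkey]; simp]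
      rw [PySem.List.foldl_if_eq_foldl_filter]
      congr 1
      rw [hm]
      exact List.filter_congr (fun t _ => hpred t)
    rw [hmatches, hbuck]
    set buckets := ms.foldl (fun d title => d.modify (key title) [] (· ++ [title]))
      (PySem.Dict.empty : PySem.Dict Int (List String)) with hbdef
    -- keys of buckets
    have hkeys : buckets.keys = PySem.Set.update (PySem.Dict.empty : PySem.Dict Int (List String)).keys (ms.map key) := by
      rw [hbdef]
      exact PySem.Dict.keys_foldl_modify_key ms key [] (fun _ t v => v ++ [t]) PySem.Dict.empty
    have hkmem : ∀ k, k ∈ buckets.keys ↔ k ∈ ms.map key := by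
      intro k; rw [hkeys, PySem.Set.mem_update]; simp [PySem.Dict.keys_empty]
    have hknodup : buckets.keys.Nodup := by
      rw [hbdef]
      exact PySem.Dict.nodup_keys_foldl_modify_key ms key [] (fun _ t v => v ++ [t])
        PySem.Dict.empty (by simp [PySem.Dict.keys_empty])
    -- buckets lookup
    have hfm : ms.foldl (fun d title => d.modify (key title) [] (· ++ [title]))
          (PySem.Dict.empty : PySem.Dict Int (List String))
        = (ms.map (fun t => ((key t : Int), t))).foldl
            (fun d pr => d.modify pr.1 [] (· ++ [pr.2])) PySem.Dict.empty := by
      rw [List.foldl_map]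
    have hgetD : ∀ k, buckets.getD k [] = ms.filter (fun y => key y == k) := by
      intro k
      rw [hbdef, hfm]
      rw [PySem.Dict.getD_foldl_modify_append]
      rw [List.filter_map]
      simp [List.map_map, Function.comp_def, PySem.Dict.getD, PySem.Dict.get?, PySem.Dict.empty]
    -- the grouped result equals the stable sort
    set ks := PySem.List.sorted buckets.keys (fun k => k) false with hksdef
    have hks_pairwise : ks.Pairwise (· < ·) := by
      have hle := PySem.List.sorted_pairwise buckets.keys (fun k => k)
      have hnd : ks.Nodup := ((PySem.List.sorted_perm buckets.keys (fun k => k) false).nodup_iff).mpr hknodup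
      exact (hle.and hnd).imp (fun h => lt_of_le_of_ne h.1 h.2)
    have hall : ∀ y ∈ ms, key y ∈ ks := by
      intro y hy
      rw [hksdef, PySem.List.mem_sorted, hkmem]
      exact List.mem_map_of_mem hy
    rw [PySem.List.foldl_append_eq_flatMap, List.nil_append]
    rw [List.flatMap_congr (fun k _ => hgetD k)]
    exact (pv_sorted_eq_grouped key ks hks_pairwise ms hall).symm

-- ===== VERDICT (by name: the statement is the Claim_ definition above) =====
theorem search_movie_titles_spec : Claim_equal_search_movie_titles := by
  intro query movie_titles max_results _
  unfold Spec_search_movie_titles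
  exact search_movie_titles_eq query movie_titles max_results
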